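-- pv_equiv track=rewrite | github.com/seo-dong-hyeon/Algorithm | 프로그래머스/연습문제/과일장수.py | solution
-- ===== SOURCE A (Python) =====
-- def solution(k, m, score):
--     answer = 0
--
--     score = sorted(score, reverse=True)
--     cnt = 0
--     min_score = 1e9
--     for i in score:
--         min_score = min(min_score, i)
--         cnt += 1
--         if cnt == m:
--             answer += min_score * m
--             cnt = 0
--
--     return answer
-- ===== SOURCE B (Python) =====
-- def solution(k, m, score):
--     # Count each score once, then walk the distinct values in descending order,
--     # forming groups of m arithmetically (no per-element pass over the sorted list).
--     if m <= 0:
--         return 0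
--     freq = {}
--     for x in score:
--         freq[x] = freq.get(x, 0) + 1
--     total = 0
--     rem = 0  # elements carried over into the currently-forming group
--     for v in sorted(freq, reverse=True):
--         c = freq[v] + rem
--         total += v * (c // m) * m
--         rem = c % m
--     return total
-- ===== Notes on version B (the rewrite author's own statement) =====
-- stated objective: alternative
-- what changed: Instead of scanning every element of the descending-sorted list with a running counter and minimum, B counts each score once in a dict and walks only the sorted distinct values, forming the m-groups arithmetically with div/mod on the counts.
-- outside the precondition, e.g. on solution(0, 2, [2000000000, 1500000000]): A returns 2000000000.0, B returns 3000000000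
import Mathlib
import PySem

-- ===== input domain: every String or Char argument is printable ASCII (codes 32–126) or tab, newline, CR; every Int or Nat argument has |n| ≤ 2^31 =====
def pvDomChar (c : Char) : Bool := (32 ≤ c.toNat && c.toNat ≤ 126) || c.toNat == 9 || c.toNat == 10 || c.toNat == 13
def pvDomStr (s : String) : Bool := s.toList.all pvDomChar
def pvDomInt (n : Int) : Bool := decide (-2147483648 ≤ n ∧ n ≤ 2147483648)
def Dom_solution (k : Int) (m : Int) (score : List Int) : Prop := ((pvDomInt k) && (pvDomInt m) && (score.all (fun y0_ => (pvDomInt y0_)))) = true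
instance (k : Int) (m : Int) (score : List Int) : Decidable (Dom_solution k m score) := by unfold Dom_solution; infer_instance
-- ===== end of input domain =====

-- B replaces A's per-element pass over the descending-sorted list by a frequency
-- dictionary plus one pass over the sorted DISTINCT values, forming the m-groups
-- arithmetically with div/mod on the counts (objective: alternative algorithm).


-- ===== PORT A =====
-- Python's sentinel 1e9 is a float; it is ported as the Int 1000000000, which is
-- exact under Pre_solution (there, whenever a group completes, min_score is already
-- an element < 10^9, so the float sentinel never reaches the answer).
def solution (k : Int) (m : Int) (score : List Int) : Int :=
  let sorted := PySem.List.sorted score (fun x => x) true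
  let st := sorted.foldl
    (fun (st : Int × Int × Int) i =>
      let min_score := min st.2.2 i
      let cnt := st.2.1 + 1
      if cnt = m then (st.1 + min_score * m, 0, min_score) else (st.1, cnt, min_score))
    (0, 0, 1000000000)
  st.1

-- ===== PORT B =====
def solution_alt (k : Int) (m : Int) (score : List Int) : Int :=
  if m ≤ 0 then 0
  else
    let freq := score.foldl (fun d x => d.modify x 0 (· + 1)) (PySem.Dict.empty : PySem.Dict Int Int)
    let st := (PySem.List.sorted freq.keys (fun x => x) true).foldl
      (fun (st : Int × Int) v =>
        let c := freq.getD v 0 + st.2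
        (st.1 + v * PySem.Int.floordiv c m * m, PySem.Int.mod c m))
      (0, 0)
    st.1

-- ===== PRECONDITION & SPEC =====
-- Pre_ excludes exactly the inputs on which A returns a FLOAT instead of an int:
-- when at least m elements are ≥ 10^9, a group completes while min_score is still
-- the float sentinel 1e9, so A's answer is a float (e.g. 2e+09), not an int.
def Pre_solution (k : Int) (m : Int) (score : List Int) : Prop :=
  m ≤ 0 ∨ ((score.countP (fun x => 1000000000 ≤ x) : Int) < m)
instance (k : Int) (m : Int) (score : List Int) : Decidable (Pre_solution k m score) := by
  unfold Pre_solution; infer_instance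

def pvWitness_solution : Int × Int × List Int := (4, 3, [1, 2, 3, 1, 2, 3, 1])

def Spec_solution (k : Int) (m : Int) (score : List Int) (out : Int) : Prop := out = solution_alt k m score
instance (k : Int) (m : Int) (score : List Int) (out : Int) : Decidable (Spec_solution k m score out) := by unfold Spec_solution; infer_instance

-- ===== CLAIM (what is proved, stated in full; the proofs are below) =====
def Claim_equal_solution : Prop := ∀ (k : Int) (m : Int) (score : List Int), Dom_solution k m score → Pre_solution k m score → Spec_solution k m score (solution k m score)

-- ===== LEMMAS AND PROOFS =====

-- the m-grouping skeleton both loops compute: running counter, emit x*m when it hits m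
def gA (m : Int) : Int → List Int → Int
  | _, [] => 0
  | cnt, x :: l => if cnt + 1 = m then x * m + gA m 0 l else gA m (cnt + 1) l

-- A's loop body
def stepA (m : Int) (st : Int × Int × Int) (i : Int) : Int × Int × Int :=
  let min_score := min st.2.2 i
  let cnt := st.2.1 + 1
  if cnt = m then (st.1 + min_score * m, 0, min_score) else (st.1, cnt, min_score)

-- On a descending list whose elements are all ≤ mn, A's loop computes gA.
theorem foldA_main (m : Int) (l : List Int) : ∀ (ans cnt mn : Int),
    l.Pairwise (· ≥ ·) → (∀ x ∈ l, x ≤ mn) →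
    (l.foldl (stepA m) (ans, cnt, mn)).1 = ans + gA m cnt l := by
  induction l with
  | nil => intro ans cnt mn _ _; simp [gA]
  | cons x t ih =>
    intro ans cnt mn hp hle
    have hx : min mn x = x := min_eq_right (hle x (by simp))
    have ht : ∀ y ∈ t, y ≤ x := fun y hy => List.rel_of_pairwise_cons hp hy
    simp only [List.foldl_cons, stepA, hx, gA]
    split
    · rw [ih _ _ _ hp.of_cons ht]; ring_nf
    · rw [ih _ _ _ hp.of_cons ht]

-- prefix of ≥ 10^9 elements: no group completes there, the sentinel survives
theorem foldA_prefix (m : Int) (l : List Int) : ∀ (ans cnt : Int),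
    (∀ x ∈ l, 1000000000 ≤ x) → 0 ≤ cnt → cnt + l.length < m →
    l.foldl (stepA m) (ans, cnt, 1000000000) = (ans, cnt + l.length, 1000000000) := by
  induction l with
  | nil => intro ans cnt _ _ _; simp
  | cons x t ih =>
    intro ans cnt hbig h0 hlt
    have hx : min (1000000000 : Int) x = 1000000000 := min_eq_left (hbig x (by simp))
    have hne : cnt + 1 ≠ m := by simp at hlt; omega
    simp only [List.foldl_cons, stepA, hx, if_neg hne]
    rw [ih _ _ (fun y hy => hbig y (by simp [hy])) (by omega) (by simp at hlt ⊢; omega)]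
    simp; omega

-- m ≤ 0: the counter (≥ 0) can never hit m, the answer stays put
theorem foldA_neg (m : Int) (l : List Int) : ∀ (ans cnt mn : Int),
    0 ≤ cnt → m ≤ 0 → (l.foldl (stepA m) (ans, cnt, mn)).1 = ans := by
  induction l with
  | nil => intro ans cnt mn _ _; simp
  | cons x t ih =>
    intro ans cnt mn h0 hm
    have hne : cnt + 1 ≠ m := by omega
    simp only [List.foldl_cons, stepA, if_neg hne]
    exact ih _ _ _ (by omega) hm

theorem gA_skip (m : Int) (l : List Int) : ∀ (cnt : Int) (rest : List Int),
    0 ≤ cnt → cnt + l.length < m → gA m cnt (l ++ rest) = gA m (cnt + l.length) rest := by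
  induction l with
  | nil => intro cnt rest _ _; simp
  | cons x t ih =>
    intro cnt rest h0 hlt
    have hne : cnt + 1 ≠ m := by simp at hlt; omega
    simp only [List.cons_append, gA, if_neg hne]
    rw [ih _ _ (by omega) (by simp at hlt ⊢; omega)]
    simp; ring_nf

-- B's per-value arithmetic equals gA on a run of c copies of v
theorem gA_replicate (m v : Int) (hm : 0 < m) (c : Nat) : ∀ (cnt : Int) (rest : List Int),
    0 ≤ cnt → cnt < m →
    gA m cnt (List.replicate c v ++ rest)
      = v * ((cnt + c) / m) * m + gA m ((cnt + c) % m) rest := by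
  induction c with
  | zero =>
    intro cnt rest h0 hlt
    simp [Int.ediv_eq_zero_of_lt h0 hlt, Int.emod_eq_of_lt h0 hlt]
  | succ c ih =>
    intro cnt rest h0 hlt
    rw [List.replicate_succ]
    simp only [List.cons_append, gA]
    by_cases h : cnt + 1 = m
    · rw [if_pos h, ih 0 rest le_rfl hm]
      have h1 : cnt + (c + 1 : Nat) = (0 + c) + 1 * m := by push_cast; omega
      rw [h1, Int.add_mul_ediv_right _ _ (by omega), Int.add_mul_emod_self_right]
      push_cast; ring_nf
    · rw [if_neg h, ih (cnt + 1) rest (by omega) (by omega)]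
      have h1 : cnt + 1 + c = cnt + (c + 1 : Nat) := by push_cast; ring
      rw [h1]

-- B's whole loop computes gA of the flattened runs
theorem foldB (m : Int) (hm : 0 < m) (cnt : Int → Nat) (vs : List Int) : ∀ (total rem : Int),
    0 ≤ rem → rem < m →
    (vs.foldl (fun (st : Int × Int) v =>
        (st.1 + v * PySem.Int.floordiv ((cnt v : Int) + st.2) m * m,
         PySem.Int.mod ((cnt v : Int) + st.2) m)) (total, rem)).1
      = total + gA m rem (vs.flatMap (fun v => List.replicate (cnt v) v)) := by
  induction vs with
  | nil => intro total rem _ _; simp [gA]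
  | cons v t ih =>
    intro total rem h0 hlt
    simp only [List.foldl_cons, List.flatMap_cons]
    rw [gA_replicate m v hm (cnt v) rem _ h0 hlt]
    rw [PySem.Int.floordiv_eq_ediv_of_pos hm, PySem.Int.mod_eq_emod_of_pos hm]
    rw [ih _ _ (Int.emod_nonneg _ (by omega)) (Int.emod_lt_of_pos _ hm)]
    rw [Int.add_comm ((cnt v : Int)) rem]
    ring_nf

theorem count_flatMap_replicate (cnt : Int → Nat) (vs : List Int) (h : vs.Nodup) (x : Int) :
    (vs.flatMap (fun v => List.replicate (cnt v) v)).count x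
      = if x ∈ vs then cnt x else 0 := by
  induction vs with
  | nil => simp
  | cons v t ih =>
    simp only [List.flatMap_cons, List.count_append, List.count_replicate,
      ih h.of_cons, List.mem_cons]
    by_cases hxv : x = v
    · subst hxv
      simp [List.Nodup.notMem h]
    · simp [hxv, Ne.symm hxv]

theorem pairwise_flatMap_replicate (cnt : Int → Nat) (vs : List Int)
    (h : vs.Pairwise (· > ·)) :
    (vs.flatMap (fun v => List.replicate (cnt v) v)).Pairwise (· ≥ ·) := by
  induction vs with
  | nil => simp
  | cons v t ih =>
    simp only [List.flatMap_cons]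
    rw [List.pairwise_append]
    refine ⟨List.pairwise_replicate.2 (Or.inr le_rfl), ih h.of_cons, ?_⟩
    intro a ha b hb
    obtain rfl := List.eq_of_mem_replicate ha
    obtain ⟨w, hw, hbw⟩ := List.mem_flatMap.1 hb
    obtain rfl := List.eq_of_mem_replicate hbw
    exact le_of_lt (List.rel_of_pairwise_cons h hw)

-- the descending-sorted list is the concatenation of the runs of the
-- descending-sorted distinct values, each repeated by its multiplicity
theorem flatMap_eq_sorted (score : List Int) :
    (PySem.List.sorted (PySem.Set.ofList score) (fun x => x) true).flatMap
        (fun v => List.replicate (score.count v) v)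
      = PySem.List.sorted score (fun x => x) true := by
  set vs := PySem.List.sorted (PySem.Set.ofList score) (fun x => x) true with hvs
  set s := PySem.List.sorted score (fun x => x) true with hs
  have hnd : vs.Nodup :=
    ((PySem.List.sorted_perm (PySem.Set.ofList score) (fun x => x) true).nodup_iff).2
      (PySem.Set.nodup_ofList score)
  have hgt : vs.Pairwise (· > ·) := by
    have h1 : vs.Pairwise (fun a b => b ≤ a) := PySem.List.sorted_pairwise_rev _ _
    have := h1.and hnd
    exact this.imp (fun {a b} ⟨h2, h3⟩ => lt_of_le_of_ne h2 (Ne.symm h3))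
  have hperm : ((vs.flatMap (fun v => List.replicate (score.count v) v))).Perm s := by
    rw [List.perm_iff_count]
    intro x
    rw [count_flatMap_replicate _ _ hnd]
    have hmem : x ∈ vs ↔ x ∈ score := by
      rw [hvs, PySem.List.mem_sorted]
      exact PySem.Set.mem_ofList _ _
    have hcs : s.count x = score.count x :=
      (PySem.List.sorted_perm score (fun x => x) true).count_eq x
    by_cases hx : x ∈ score
    · simp [hmem, hx, hcs]
    · simp [hmem, hx, hcs, List.count_eq_zero.2 hx]
  refine List.eq_of_perm_of_sorted (fun a b _ _ hab hba => le_antisymm hba hab)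
    (pairwise_flatMap_replicate _ _ hgt) ?_ hperm
  exact (PySem.List.sorted_pairwise_rev score (fun x => x)).imp (fun h => h)

theorem main_thm (k m : Int) (score : List Int)
    (hpre : m ≤ 0 ∨ ((score.countP (fun x => 1000000000 ≤ x) : Int) < m)) :
    solution k m score = solution_alt k m score := by
  by_cases hm : m ≤ 0
  · rw [solution_alt, if_pos hm]
    exact foldA_neg m _ 0 0 1000000000 le_rfl hm
  · have hm' : 0 < m := by omega
    set p : Int → Bool := fun x => decide (1000000000 ≤ x) with hp
    have hcount : ((score.countP p : Int) < m) := hpre.resolve_left hm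
    set s := PySem.List.sorted score (fun x => x) true with hs
    -- A side
    have hsplit : s = s.takeWhile p ++ s.dropWhile p := (List.takeWhile_append_dropWhile).symm
    have hsp : s.Pairwise (· ≥ ·) :=
      (PySem.List.sorted_pairwise_rev score (fun x => x)).imp (fun h => h)
    have hcs : s.countP p = score.countP p :=
      (PySem.List.sorted_perm score (fun x => x) true).countP_eq p
    have hlen : ((s.takeWhile p).length : Int) < m := by
      have h1 : (s.takeWhile p).countP p = (s.takeWhile p).length :=
        List.countP_eq_length.2 (fun a ha => List.mem_takeWhile_imp ha)
      have h2 : s.countP p = (s.takeWhile p).countP p + (s.dropWhile p).countP p := by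
        conv_lhs => rw [hsplit]
        exact List.countP_append
      have h3 : (s.takeWhile p).length ≤ score.countP p := by omega
      omega
    have hdrop_pair : (s.dropWhile p).Pairwise (· ≥ ·) :=
      List.Pairwise.sublist (List.dropWhile_sublist p) hsp
    have hdrop_le : ∀ x ∈ s.dropWhile p, x ≤ 1000000000 := by
      intro x hx
      cases hd : s.dropWhile p with
      | nil => rw [hd] at hx; simp at hx
      | cons h t =>
        have hh : p h = false := by
          have := List.head_dropWhile_not p (l := s) (by rw [hd]; simp)
          simp only [hd] at this
          simpa using this
        have hh' : h ≤ 1000000000 := by simp [hp] at hh; omega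
        rw [hd] at hx
        rcases List.mem_cons.1 hx with rfl | hx'
        · exact hh'
        · have : x ≤ h := by
            rw [hd] at hdrop_pair
            exact List.rel_of_pairwise_cons hdrop_pair hx'
          omega
    have hA : solution k m score = gA m 0 s := by
      show (s.foldl (stepA m) (0, 0, 1000000000)).1 = gA m 0 s
      conv_lhs => rw [hsplit]
      rw [List.foldl_append,
        foldA_prefix m _ 0 0 (fun x hx => by
          have := List.mem_takeWhile_imp hx; simpa [hp] using this) le_rfl (by omega),
        foldA_main m _ _ _ _ hdrop_pair hdrop_le, zero_add]
      conv_rhs => rw [hsplit]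
      rw [gA_skip m _ 0 _ le_rfl (by omega), zero_add]
    -- B side
    have hB : solution_alt k m score
        = gA m 0 ((PySem.List.sorted (PySem.Set.ofList score) (fun x => x) true).flatMap
            (fun v => List.replicate (score.count v) v)) := by
      rw [solution_alt, if_neg hm]
      have hfreq : score.foldl (fun d x => d.modify x 0 (· + 1)) (PySem.Dict.empty : PySem.Dict Int Int)
          = PySem.Dict.counter score := (PySem.Dict.counter_eq_foldl score).symm
      simp only [hfreq, PySem.Dict.keys_counter]
      have hfun : (fun (st : Int × Int) v =>
            ((st.1 + v * PySem.Int.floordiv ((PySem.Dict.counter score).getD v 0 + st.2) m * m,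
              PySem.Int.mod ((PySem.Dict.counter score).getD v 0 + st.2) m) : Int × Int))
          = (fun (st : Int × Int) v =>
            (st.1 + v * PySem.Int.floordiv ((score.count v : Int) + st.2) m * m,
             PySem.Int.mod ((score.count v : Int) + st.2) m)) := by
        funext st v
        rw [PySem.Dict.getD_counter]
      show ((PySem.List.sorted (PySem.Set.ofList score) (fun x => x) true).foldl _ (0,0)).1 = _
      rw [hfun, foldB m hm' (fun v => score.count v) _ 0 0 le_rfl hm', zero_add]
    rw [hA, hB, flatMap_eq_sorted]

-- ===== VERDICT (by name: the statement is the Claim_ definition above) =====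
theorem solution_spec : Claim_equal_solution := by
  intro k m score _ hpre
  unfold Spec_solution
  exact main_thm k m score hpre
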